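-- pv_equiv track=rewrite | github.com/MPeters27/Azul | functions.py | create_template_spne
-- ===== SOURCE A (Python) =====
-- def create_template_spne(width, depth):
--
--     total_entries = 0
--     tick = 0
--     new_dict = {}
--
--     while tick < depth:
--         total_entries += width**tick
--         tick += 1
--
--     for i in range(total_entries):
--         new_dict[str(i)] = 'E'
--
--     return new_dict
-- ===== SOURCE B (Python) =====
-- def create_template_spne(width, depth):
--     if depth <= 0:
--         total_entries = 0
--     elif width == 1:
--         total_entries = depth
--     else:
--         total_entries = (width**depth - 1) // (width - 1)
--     return {str(i): 'E' for i in range(total_entries)}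
-- ===== Notes on version B (the rewrite author's own statement) =====
-- stated objective: simpler
-- what changed: The accumulating while loop over tick that sums width**tick is replaced by the closed-form geometric sum (width**depth - 1)//(width - 1) (with the depth<=0 and width==1 cases), the dict then built directly from that count.
import Mathlib
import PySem

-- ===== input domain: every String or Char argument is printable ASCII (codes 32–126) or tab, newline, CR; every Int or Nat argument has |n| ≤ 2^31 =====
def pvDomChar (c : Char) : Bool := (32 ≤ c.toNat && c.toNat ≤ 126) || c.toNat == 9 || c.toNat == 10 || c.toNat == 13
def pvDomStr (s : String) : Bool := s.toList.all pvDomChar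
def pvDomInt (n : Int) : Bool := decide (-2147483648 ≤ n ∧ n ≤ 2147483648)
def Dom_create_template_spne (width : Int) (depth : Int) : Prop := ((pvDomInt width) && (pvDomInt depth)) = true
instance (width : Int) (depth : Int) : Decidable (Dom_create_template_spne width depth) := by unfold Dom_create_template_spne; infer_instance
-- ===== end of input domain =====

-- B replaces A's while-loop geometric summation by the closed-form count; the dict build itself is unchanged.


-- ===== PORT A =====
-- the 'while tick < depth: total_entries += width**tick; tick += 1' loop
def pvLoopA (width depth tick total : Int) : Int :=
  if tick < depth then
    pvLoopA width depth (tick + 1) (total + width ^ tick.toNat)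
  else
    total
termination_by (depth - tick).toNat
decreasing_by omega

def create_template_spne (width : Int) (depth : Int) : List (String × String) :=
  let total_entries : Int := pvLoopA width depth 0 0
  -- for i in range(total_entries): new_dict[str(i)] = 'E'
  ((PySem.List.pyRange 0 total_entries 1).foldl
      (fun d i => PySem.Dict.insert d (PySem.Int.toStr i) "E")
      PySem.Dict.empty).items

-- ===== PORT B =====
def create_template_spne_alt (width : Int) (depth : Int) : List (String × String) :=
  let total_entries : Int :=
    if depth ≤ 0 then 0
    else if width = 1 then depth
    else PySem.Int.floordiv (width ^ depth.toNat - 1) (width - 1)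
  -- {str(i): 'E' for i in range(total_entries)}
  ((PySem.List.pyRange 0 total_entries 1).foldl
      (fun d i => PySem.Dict.insert d (PySem.Int.toStr i) "E")
      PySem.Dict.empty).items

-- ===== PRECONDITION & SPEC =====
def Spec_create_template_spne (width : Int) (depth : Int) (out : List (String × String)) : Prop := out = create_template_spne_alt width depth
instance (width : Int) (depth : Int) (out : List (String × String)) : Decidable (Spec_create_template_spne width depth out) := by unfold Spec_create_template_spne; infer_instance

-- ===== CLAIM (what is proved, stated in full; the proofs are below) =====
def Claim_equal_create_template_spne : Prop := ∀ (width : Int) (depth : Int), Dom_create_template_spne width depth → Spec_create_template_spne width depth (create_template_spne width depth)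

-- ===== LEMMAS AND PROOFS =====

-- The while loop adds the geometric terms width^tick for tick in [tick0, depth).
theorem pvLoopA_eq (n : Nat) : ∀ (w d tick acc : Int), 0 ≤ tick → (d - tick).toNat = n →
    pvLoopA w d tick acc = acc + ∑ i ∈ Finset.range n, w ^ (tick.toNat + i) := by
  induction n with
  | zero =>
    intro w d tick acc _ hn
    rw [pvLoopA]
    simp only [Finset.range_zero, Finset.sum_empty, add_zero]
    rw [if_neg (by omega)]
  | succ n ih =>
    intro w d tick acc htick hn
    rw [pvLoopA, if_pos (by omega)]
    rw [ih w d (tick + 1) (acc + w ^ tick.toNat) (by omega) (by omega)]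
    rw [Finset.sum_range_succ' (fun i => w ^ (tick.toNat + i)) n]
    have h1 : (tick + 1).toNat = tick.toNat + 1 := by omega
    simp only [h1, add_zero]
    have : ∀ i, tick.toNat + 1 + i = tick.toNat + (i + 1) := by omega
    simp only [this]
    ring

theorem pvLoopA_closed (w d : Int) :
    pvLoopA w d 0 0 =
      (if d ≤ 0 then 0
       else if w = 1 then d
       else PySem.Int.floordiv (w ^ d.toNat - 1) (w - 1)) := by
  rw [pvLoopA_eq d.toNat w d 0 0 le_rfl (by omega)]
  simp only [Int.toNat_zero, zero_add]
  by_cases hd : d ≤ 0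
  · rw [if_pos hd]
    have : d.toNat = 0 := by omega
    simp [this]
  · rw [if_neg hd]
    by_cases hw : w = 1
    · subst hw
      rw [if_pos rfl]
      simp only [one_pow, Finset.sum_const, Finset.card_range, nsmul_eq_mul, mul_one]
      omega
    · rw [if_neg hw]
      have hmul : (∑ i ∈ Finset.range d.toNat, w ^ i) * (w - 1) = w ^ d.toNat - 1 :=
        geom_sum_mul w d.toNat
      rw [PySem.Int.floordiv, ← hmul, Int.mul_fdiv_cancel _ (by omega)]

-- ===== VERDICT (by name: the statement is the Claim_ definition above) =====
theorem create_template_spne_spec : Claim_equal_create_template_spne := by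
  intro width depth _
  unfold Spec_create_template_spne create_template_spne create_template_spne_alt
  rw [pvLoopA_closed]
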